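-- pv_equiv track=rewrite | github.com/Ysh096/programmers | D2/더맵게/s1.py | solution
-- ===== SOURCE A (Python) =====
-- def heappush(heap, item):
--     """Push item onto heap, maintaining the heap invariant."""
--     heap.append(item)
--     _siftdown(heap, 0, len(heap)-1)
--
-- def _siftdown(heap, startpos, pos):
--     newitem = heap[pos]
--     # Follow the path to the root, moving parents down until finding a place
--     # newitem fits.
--     while pos > startpos:
--         parentpos = (pos - 1) >> 1
--         parent = heap[parentpos]
--         if newitem < parent:
--             heap[pos] = parent
--             pos = parentpos
--             continue
--         break
--     heap[pos] = newitem
--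
-- def heappop(heap):
--     """Pop the smallest item off the heap, maintaining the heap invariant."""
--     lastelt = heap.pop()    # raises appropriate IndexError if heap is empty
--     if heap:
--         returnitem = heap[0]
--         heap[0] = lastelt
--         _siftup(heap, 0)
--         return returnitem
--     return lastelt
--
-- def _siftup(heap, pos):
--     endpos = len(heap)
--     startpos = pos
--     newitem = heap[pos]
--     # Bubble up the smaller child until hitting a leaf.
--     childpos = 2*pos + 1    # leftmost child position
--     while childpos < endpos:
--         # Set childpos to index of smaller child.
--         rightpos = childpos + 1
--         if rightpos < endpos and not heap[childpos] < heap[rightpos]: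
--             childpos = rightpos
--         # Move the smaller child up.
--         heap[pos] = heap[childpos]
--         pos = childpos
--         childpos = 2*pos + 1
--     # The leaf at pos is empty now.  Put newitem there, and bubble it up
--     # to its final resting place (by sifting its parents down).
--     heap[pos] = newitem
--     _siftdown(heap, startpos, pos)
--
-- def solution(scoville, K):
--     heap = []
--     for i in scoville:
--         heappush(heap, i)
--     cnt = 0
--     while heap[0] < K and len(heap) > 1:
--         # 가장 안 매운 음식 뽑기, 뽑고 나면 heap이 재정렬됨! (뿌리 노드가 바뀌기 때문에 부모-자식 관계를 재정렬해야함)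
--         least_spicy = heappop(heap)
--         # 재정렬이 되고 나면 또 뿌리 노드에 최솟값이 있게 됨.
--         # [1, 3, 2, 9, 10, 12] 라면 3과 2는 처음에는 형제 관계라 1을 뽑고 나면 2와 3을 비교해야 할 것 같지만
--         # 1을 뽑고 난 후에는 [2, 3, 12, 9, 10] 으로 재정렬되어 2가 가장 앞(최솟값)에 위치하게 된다.
--         # 그래서 그냥 또 뽑으면 된다!
--         second_spicy = heappop(heap)
--         new = least_spicy + second_spicy * 2
--         heappush(heap, new)
--         cnt += 1
--     # while문이 끝난 경우는 가장 작은 값이 K보다 큰 경우거나,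
--     # K보다 작고 scoville이 하나만 남은 경우이다.
--     if len(heap) == 1 and heap[0] < K:
--         return -1
--     else:
--         return cnt
-- ===== SOURCE B (Python) =====
-- import bisect
--
-- def solution(scoville, K):
--     lst = sorted(scoville)
--     cnt = 0
--     while lst[0] < K and len(lst) > 1:
--         l = lst.pop(0)
--         s = lst.pop(0)
--         bisect.insort(lst, l + s * 2)
--         cnt += 1
--     if len(lst) == 1 and lst[0] < K:
--         return -1
--     else:
--         return cnt
-- ===== Notes on version B (the rewrite author's own statement) =====
-- stated objective: simpler
-- what changed: Replaces the hand-written binary heap (siftdown/siftup array operations) with a fully sorted list: pop the two smallest from the front and reinsert the mix with bisect.insort.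
-- outside the precondition, e.g. on solution([], 7): A raises IndexError, B raises IndexError
import Mathlib
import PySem

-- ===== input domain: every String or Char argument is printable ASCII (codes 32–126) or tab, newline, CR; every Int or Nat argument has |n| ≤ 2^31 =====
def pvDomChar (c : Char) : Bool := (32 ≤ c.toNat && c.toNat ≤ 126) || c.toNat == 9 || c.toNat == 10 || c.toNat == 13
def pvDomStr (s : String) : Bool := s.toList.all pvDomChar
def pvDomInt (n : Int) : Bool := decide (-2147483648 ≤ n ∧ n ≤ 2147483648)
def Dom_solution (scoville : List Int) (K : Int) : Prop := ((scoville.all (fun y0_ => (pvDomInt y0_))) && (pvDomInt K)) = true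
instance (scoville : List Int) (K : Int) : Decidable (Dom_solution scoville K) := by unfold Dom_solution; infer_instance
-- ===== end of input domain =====

-- B replaces A's hand-written binary heap by a sorted list maintained with bisect.insort
-- (pop the two smallest from the front, reinsert the mix); equivalence of return values is proved
-- on nonempty scoville (A's heap[0] raises IndexError on []). A does not mutate its arguments.

-- ===== PORT A =====
-- while-loop of _siftdown: moves parents down, carrying (heap, pos); newitem fixed
def pvSiftdownLoop (heap : List Int) (newitem : Int) (startpos pos : Nat) : List Int × Nat :=
  if hlt : startpos < pos then
    let parentpos := (pos - 1) / 2
    let parent := heap.getD parentpos 0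
    if newitem < parent then
      pvSiftdownLoop (heap.set pos parent) newitem startpos parentpos
    else (heap, pos)
  else (heap, pos)
termination_by pos
decreasing_by
  exact Nat.lt_of_le_of_lt (Nat.div_le_self (pos - 1) 2)
    (Nat.sub_lt (Nat.lt_of_le_of_lt (Nat.zero_le startpos) hlt) Nat.one_pos)

def pvSiftdown (heap : List Int) (startpos pos : Nat) : List Int :=
  let newitem := heap.getD pos 0
  let r := pvSiftdownLoop heap newitem startpos pos
  r.1.set r.2 newitem

def pvHeappush (heap : List Int) (item : Int) : List Int :=
  pvSiftdown (heap ++ [item]) 0 heap.length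

-- while-loop of _siftup: moves the smaller child up, carrying (heap, pos, childpos); endpos fixed
def pvSiftupLoop (heap : List Int) (endpos pos childpos : Nat) : List Int × Nat :=
  if hlt : childpos < endpos then
    let rightpos := childpos + 1
    let childpos2 := if rightpos < endpos ∧ ¬ (heap.getD childpos 0 < heap.getD rightpos 0)
      then rightpos else childpos
    pvSiftupLoop (heap.set pos (heap.getD childpos2 0)) endpos childpos2 (2 * childpos2 + 1)
  else (heap, pos)
termination_by endpos - childpos
decreasing_by
  refine Nat.sub_lt_sub_left hlt (Nat.lt_succ_of_le (Nat.le_trans ?_ (Nat.le.intro (two_mul _).symm)))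
  split
  · exact Nat.le_succ childpos
  · exact Nat.le_refl childpos

def pvSiftup (heap : List Int) (pos : Nat) : List Int :=
  let endpos := heap.length
  let startpos := pos
  let newitem := heap.getD pos 0
  let r := pvSiftupLoop heap endpos pos (2 * pos + 1)
  pvSiftdown (r.1.set r.2 newitem) startpos r.2

def pvHeappop (heap : List Int) : Int × List Int :=
  let lastelt := heap.getD (heap.length - 1) 0   -- heap.pop(); caller guarantees heap ≠ []
  let heap2 := heap.dropLast
  if heap2.isEmpty then (lastelt, heap2)
  else (heap2.getD 0 0, pvSiftup (heap2.set 0 lastelt) 0)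

-- the while-loop of solution (together with the final return); the fuel argument is only a
-- termination guard: the heap shrinks by one per iteration, so fuel = initial length never runs out
def pvLoop : Nat → List Int → Int → Int → Int
  | 0, _, cnt, _ => cnt
  | fuel+1, heap, cnt, K =>
    if heap.getD 0 0 < K ∧ 1 < heap.length then
      let p1 := pvHeappop heap
      let p2 := pvHeappop p1.2
      pvLoop fuel (pvHeappush p2.2 (p1.1 + p2.1 * 2)) (cnt + 1) K
    else if heap.length = 1 ∧ heap.getD 0 0 < K then -1 else cnt

def solution (scoville : List Int) (K : Int) : Int :=
  let heap := scoville.foldl (fun h i => pvHeappush h i) []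
  pvLoop heap.length heap 0 K

-- ===== PORT B =====
-- bisect.insort on a sorted list: insert after existing equal elements
def pvInsort (x : Int) : List Int → List Int
  | [] => [x]
  | y :: ys => if x < y then x :: y :: ys else y :: pvInsort x ys

-- the while-loop of B (together with the final return); same fuel guard as pvLoop
def pvLoopB : Nat → List Int → Int → Int → Int
  | 0, _, cnt, _ => cnt
  | fuel+1, lst, cnt, K =>
    if lst.getD 0 0 < K ∧ 1 < lst.length then
      let l := lst.getD 0 0
      let s := lst.getD 1 0
      pvLoopB fuel (pvInsort (l + s * 2) (lst.drop 2)) (cnt + 1) K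
    else if lst.length = 1 ∧ lst.getD 0 0 < K then -1 else cnt

def solution_alt (scoville : List Int) (K : Int) : Int :=
  pvLoopB (PySem.List.sorted scoville (fun x => x) false).length
    (PySem.List.sorted scoville (fun x => x) false) 0 K

-- ===== PRECONDITION & SPEC =====
-- Pre_ excludes only the empty list, on which A raises IndexError at heap[0] (B's lst[0] raises too).
def Pre_solution (scoville : List Int) (K : Int) : Prop := scoville ≠ []
instance (scoville : List Int) (K : Int) : Decidable (Pre_solution scoville K) := by
  unfold Pre_solution; infer_instance
def pvWitness_solution : List Int × Int := ([1, 2, 3, 9, 10, 12], 7)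

def Spec_solution (scoville : List Int) (K : Int) (out : Int) : Prop := out = solution_alt scoville K
instance (scoville : List Int) (K : Int) (out : Int) : Decidable (Spec_solution scoville K out) := by
  unfold Spec_solution; infer_instance

-- ===== CLAIM (what is proved, stated in full; the proofs are below) =====
def Claim_equal_solution : Prop := ∀ (scoville : List Int) (K : Int), Dom_solution scoville K → Pre_solution scoville K → Spec_solution scoville K (solution scoville K)

-- ===== LEMMAS AND PROOFS =====

-- binary-heap invariant: every parent is ≤ its children
def pvIsHeap (h : List Int) : Prop :=
  ∀ i j : Nat, (j = 2*i+1 ∨ j = 2*i+2) → j < h.length → h.getD i 0 ≤ h.getD j 0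

-- heap invariant except possibly at the one pair (parent of pos, pos)
def pvHExc (H : List Int) (pos : Nat) : Prop :=
  ∀ i j : Nat, (j = 2*i+1 ∨ j = 2*i+2) → j < H.length → j ≠ pos → H.getD i 0 ≤ H.getD j 0

-- small getD/set helpers
theorem pv_getD_lt (l : List Int) (i : Nat) (h : i < l.length) : l.getD i 0 = l[i] := by
  simp [List.getD_eq_getElem?_getD, h]

theorem pv_getD_set_self (l : List Int) (i : Nat) (a : Int) (h : i < l.length) :
    (l.set i a).getD i 0 = a := by
  simp [List.getD_eq_getElem?_getD, h]

theorem pv_getD_set_ne (l : List Int) (i j : Nat) (a : Int) (h : i ≠ j) :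
    (l.set i a).getD j 0 = l.getD j 0 := by
  simp [List.getD_eq_getElem?_getD, h]

theorem pv_set_getD_self (l : List Int) (i : Nat) (h : i < l.length) :
    l.set i (l.getD i 0) = l := by
  simp [List.getD_eq_getElem?_getD, h]

theorem pv_getD_append_len (xs : List Int) (x : Int) : (xs ++ [x]).getD xs.length 0 = x := by
  simp [List.getD_eq_getElem?_getD]

theorem pv_getD_append_lt (xs : List Int) (x : Int) (i : Nat) (h : i < xs.length) :
    (xs ++ [x]).getD i 0 = xs.getD i 0 := by
  simp [List.getD_eq_getElem?_getD, List.getElem?_append_left, h]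

theorem pv_dropLast_getD (l : List Int) (i : Nat) (h : i < l.length - 1) :
    l.dropLast.getD i 0 = l.getD i 0 := by
  rw [pv_getD_lt _ _ (by simp; omega), pv_getD_lt _ _ (by omega), List.getElem_dropLast]

-- length facts cited by pvLoop's decreasing_by
theorem pvSiftdownLoop_len (heap : List Int) (n : Int) (s p : Nat) :
    (pvSiftdownLoop heap n s p).1.length = heap.length := by
  fun_induction pvSiftdownLoop heap n s p <;> simp_all

theorem pvSiftdown_len (heap : List Int) (s p : Nat) :
    (pvSiftdown heap s p).length = heap.length := by
  simp [pvSiftdown, pvSiftdownLoop_len]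

theorem pvSiftupLoop_len (heap : List Int) (e p c : Nat) :
    (pvSiftupLoop heap e p c).1.length = heap.length := by
  fun_induction pvSiftupLoop heap e p c <;> simp_all

theorem pvSiftup_len (heap : List Int) (p : Nat) :
    (pvSiftup heap p).length = heap.length := by
  simp [pvSiftup, pvSiftdown_len, pvSiftupLoop_len]

theorem pvHeappush_len (heap : List Int) (x : Int) :
    (pvHeappush heap x).length = heap.length + 1 := by
  simp [pvHeappush, pvSiftdown_len]

theorem pvHeappop_len (heap : List Int) :
    ((pvHeappop heap).2).length = heap.length - 1 := by
  rw [pvHeappop]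
  split <;> simp [pvSiftup_len]

-- swapping two positions of a list is a permutation
theorem pv_getD_cons_perm : ∀ (xs : List Int) (k : Nat) (x : Int), k < xs.length →
    (xs.getD k 0 :: xs.set k x).Perm (x :: xs) := by
  intro xs
  induction xs with
  | nil => intro k x hk; simp at hk
  | cons y ys ih =>
    intro k x hk
    cases k with
    | zero => simpa using List.Perm.swap x y ys
    | succ k =>
      simp only [List.getD_cons_succ, List.set_cons_succ]
      exact ((List.Perm.swap _ _ _).trans (((ih k x (by simpa using hk)).cons y))).trans
        (List.Perm.swap _ _ _)

theorem pv_swap_perm : ∀ (l : List Int) (i j : Nat), i < j → j < l.length →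
    ((l.set i (l.getD j 0)).set j (l.getD i 0)).Perm l := by
  intro l
  induction l with
  | nil => intro i j _ hj; simp at hj
  | cons y ys ih =>
    intro i j hij hj
    cases i with
    | zero =>
      obtain ⟨k, rfl⟩ : ∃ k, j = k + 1 := ⟨j - 1, by omega⟩
      simp only [List.getD_cons_succ, List.getD_cons_zero, List.set_cons_zero, List.set_cons_succ]
      exact pv_getD_cons_perm ys k y (by simpa using hj)
    | succ m =>
      obtain ⟨k, rfl⟩ : ∃ k, j = k + 1 := ⟨j - 1, by omega⟩
      simp only [List.getD_cons_succ, List.set_cons_succ]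
      exact (ih m k (by omega) (by simpa using hj)).cons y

-- step/stop equations for the siftdown while-loop (startpos = 0)
theorem pvSiftdownLoop_step (heap : List Int) (n : Int) (pos : Nat) (h1 : 0 < pos)
    (h2 : n < heap.getD ((pos-1)/2) 0) :
    pvSiftdownLoop heap n 0 pos
      = pvSiftdownLoop (heap.set pos (heap.getD ((pos-1)/2) 0)) n 0 ((pos-1)/2) := by
  rw [pvSiftdownLoop]
  simp only [dif_pos h1]
  rw [if_pos h2]

theorem pvSiftdownLoop_stop (heap : List Int) (n : Int) (pos : Nat)
    (h : ¬ (0 < pos ∧ n < heap.getD ((pos-1)/2) 0)) :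
    pvSiftdownLoop heap n 0 pos = (heap, pos) := by
  by_cases h1 : 0 < pos
  · have h2 : ¬ n < heap.getD ((pos-1)/2) 0 := fun hc => h ⟨h1, hc⟩
    rw [pvSiftdownLoop]
    simp only [dif_pos h1]
    rw [if_neg h2]
  · rw [pvSiftdownLoop]
    simp only [dif_neg h1]

-- invariant proof for the siftdown loop: sifting n up from pos yields a heap with the same multiset
theorem pvSiftdownLoop_spec : ∀ (fuel : Nat) (heap : List Int) (n : Int) (pos : Nat),
    pos ≤ fuel → pos < heap.length →
    pvHExc (heap.set pos n) pos →
    (∀ j : Nat, (j = 2*pos+1 ∨ j = 2*pos+2) → j < heap.length → 0 < pos →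
        (heap.set pos n).getD ((pos-1)/2) 0 ≤ (heap.set pos n).getD j 0) →
    pvIsHeap ((pvSiftdownLoop heap n 0 pos).1.set (pvSiftdownLoop heap n 0 pos).2 n) ∧
    ((pvSiftdownLoop heap n 0 pos).1.set (pvSiftdownLoop heap n 0 pos).2 n).Perm (heap.set pos n) ∧
    (pvSiftdownLoop heap n 0 pos).2 < heap.length := by
  intro fuel
  induction fuel with
  | zero =>
    intro heap n pos hf hp hexc _
    have hpos0 : pos = 0 := by omega
    subst hpos0
    rw [pvSiftdownLoop_stop heap n 0 (by omega)]
    refine ⟨?_, List.Perm.refl _, hp⟩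
    intro i j hc hj
    exact hexc i j hc hj (by omega)
  | succ fuel ih =>
    intro heap n pos hf hp hexc hbyp
    by_cases h1 : 0 < pos
    · by_cases h2 : n < heap.getD ((pos-1)/2) 0
      · rw [pvSiftdownLoop_step heap n pos h1 h2]
        have hpplt : (pos-1)/2 < pos := by omega
        have hlen' : (heap.set pos (heap.getD ((pos-1)/2) 0)).length = heap.length := by simp
        have hvalA : ∀ k, k ≠ (pos-1)/2 → k ≠ pos →
            ((heap.set pos (heap.getD ((pos-1)/2) 0)).set ((pos-1)/2) n).getD k 0 = heap.getD k 0 := by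
          intro k hk1 hk2
          rw [pv_getD_set_ne _ _ _ _ (fun e => hk1 e.symm), pv_getD_set_ne _ _ _ _ (fun e => hk2 e.symm)]
        have hApp : ((heap.set pos (heap.getD ((pos-1)/2) 0)).set ((pos-1)/2) n).getD ((pos-1)/2) 0 = n :=
          pv_getD_set_self _ _ _ (by rw [hlen']; omega)
        have hApos : ((heap.set pos (heap.getD ((pos-1)/2) 0)).set ((pos-1)/2) n).getD pos 0
            = heap.getD ((pos-1)/2) 0 := by
          rw [pv_getD_set_ne _ _ _ _ (by omega), pv_getD_set_self _ _ _ hp]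
        have hvalH : ∀ k, k ≠ pos → (heap.set pos n).getD k 0 = heap.getD k 0 := by
          intro k hk
          rw [pv_getD_set_ne _ _ _ _ (fun e => hk e.symm)]
        have hHpos : (heap.set pos n).getD pos 0 = n := pv_getD_set_self _ _ _ hp
        have hexc' : pvHExc ((heap.set pos (heap.getD ((pos-1)/2) 0)).set ((pos-1)/2) n) ((pos-1)/2) := by
          intro i j hc hj hjne
          have hjlen : j < heap.length := by simpa using hj
          have hij : i < j := by omega
          by_cases hjpos : j = pos
          · have hipp : i = (pos-1)/2 := by omega
            rw [hipp, hjpos, hApp, hApos]; exact le_of_lt h2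
          · by_cases hipp : i = (pos-1)/2
            · subst hipp
              rw [hApp, hvalA j (by omega) hjpos]
              have hx := hexc ((pos-1)/2) j hc (by simpa using hjlen) hjpos
              rw [hvalH ((pos-1)/2) (by omega), hvalH j hjpos] at hx
              exact le_of_lt (lt_of_lt_of_le h2 hx)
            · by_cases hipos : i = pos
              · rw [hipos] at hc
                rw [hipos, hApos, hvalA j (by omega) hjpos]
                have hx := hbyp j hc hjlen h1
                rw [hvalH ((pos-1)/2) (by omega), hvalH j hjpos] at hx
                exact hx
              · rw [hvalA i hipp hipos, hvalA j (by omega) hjpos]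
                have hx := hexc i j hc (by simpa using hjlen) hjpos
                rw [hvalH i hipos, hvalH j hjpos] at hx
                exact hx
        have hbyp' : ∀ j : Nat, (j = 2*((pos-1)/2)+1 ∨ j = 2*((pos-1)/2)+2) →
            j < (heap.set pos (heap.getD ((pos-1)/2) 0)).length → 0 < (pos-1)/2 →
            ((heap.set pos (heap.getD ((pos-1)/2) 0)).set ((pos-1)/2) n).getD (((pos-1)/2-1)/2) 0
              ≤ ((heap.set pos (heap.getD ((pos-1)/2) 0)).set ((pos-1)/2) n).getD j 0 := by
          intro j hc hj hpp0
          have hjlen : j < heap.length := by rwa [hlen'] at hj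
          have hppchild : (pos-1)/2 = 2*(((pos-1)/2-1)/2)+1 ∨ (pos-1)/2 = 2*(((pos-1)/2-1)/2)+2 := by
            omega
          have hgpv := hvalA (((pos-1)/2-1)/2) (by omega) (by omega)
          have hppheap : heap.getD (((pos-1)/2-1)/2) 0 ≤ heap.getD ((pos-1)/2) 0 := by
            have hx := hexc (((pos-1)/2-1)/2) ((pos-1)/2) hppchild (by simp; omega) (by omega)
            rw [hvalH (((pos-1)/2-1)/2) (by omega), hvalH ((pos-1)/2) (by omega)] at hx
            exact hx
          by_cases hjpos : j = pos
          · rw [hjpos, hgpv, hApos]; exact hppheap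
          · rw [hgpv, hvalA j (by omega) hjpos]
            have hx := hexc ((pos-1)/2) j hc (by simpa using hjlen) hjpos
            rw [hvalH ((pos-1)/2) (by omega), hvalH j hjpos] at hx
            exact le_trans hppheap hx
        have IH := ih (heap.set pos (heap.getD ((pos-1)/2) 0)) n ((pos-1)/2) (by omega)
          (by rw [hlen']; omega) hexc' hbyp'
        refine ⟨IH.1, ?_, by rw [← hlen']; exact IH.2.2⟩
        refine IH.2.1.trans ?_
        have hswapeq : (((heap.set pos n).set ((pos-1)/2) ((heap.set pos n).getD pos 0)).set pos
              ((heap.set pos n).getD ((pos-1)/2) 0))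
            = (heap.set pos (heap.getD ((pos-1)/2) 0)).set ((pos-1)/2) n := by
          rw [hHpos, hvalH ((pos-1)/2) (by omega)]
          rw [List.set_comm _ _ (by omega : pos ≠ (pos-1)/2), List.set_set,
            List.set_comm _ _ (by omega : pos ≠ (pos-1)/2)]
        rw [← hswapeq]
        exact pv_swap_perm (heap.set pos n) ((pos-1)/2) pos hpplt (by simpa using hp)
      · rw [pvSiftdownLoop_stop heap n pos (by tauto)]
        refine ⟨?_, List.Perm.refl _, hp⟩
        intro i j hc hj
        by_cases hjpos : j = pos
        · have hipp : i = (pos-1)/2 := by omega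
          rw [hipp, hjpos, pv_getD_set_ne _ _ _ _ (by omega : pos ≠ (pos-1)/2),
            pv_getD_set_self _ _ _ hp]
          exact not_lt.mp h2
        · exact hexc i j hc hj hjpos
    · have hpos0 : pos = 0 := by omega
      subst hpos0
      rw [pvSiftdownLoop_stop heap n 0 (by omega)]
      refine ⟨?_, List.Perm.refl _, hp⟩
      intro i j hc hj
      exact hexc i j hc hj (by omega)

theorem pvHeappush_spec (h : List Int) (x : Int) (hh : pvIsHeap h) :
    pvIsHeap (pvHeappush h x) ∧ (pvHeappush h x).Perm (x :: h) := by
  have hp : h.length < (h ++ [x]).length := by simp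
  have hset : (h ++ [x]).set h.length x = h ++ [x] := by
    have h1 := pv_set_getD_self (h ++ [x]) h.length hp
    rwa [pv_getD_append_len] at h1
  have hexc : pvHExc ((h ++ [x]).set h.length x) h.length := by
    rw [hset]
    intro i j hc hj hjne
    have hj' : j < h.length := by simp at hj; omega
    have hi' : i < h.length := by omega
    rw [pv_getD_append_lt _ _ _ hi', pv_getD_append_lt _ _ _ hj']
    exact hh i j hc hj'
  have hbyp : ∀ j : Nat, (j = 2*h.length+1 ∨ j = 2*h.length+2) → j < (h ++ [x]).length →
      0 < h.length →
      ((h ++ [x]).set h.length x).getD ((h.length-1)/2) 0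
        ≤ ((h ++ [x]).set h.length x).getD j 0 := by
    intro j hc hj _
    exfalso; simp at hj; omega
  have main := pvSiftdownLoop_spec h.length (h ++ [x]) x h.length le_rfl hp hexc hbyp
  have hunf : pvHeappush h x
      = (pvSiftdownLoop (h ++ [x]) x 0 h.length).1.set (pvSiftdownLoop (h ++ [x]) x 0 h.length).2 x := by
    simp only [pvHeappush, pvSiftdown, pv_getD_append_len]
  rw [hunf]
  refine ⟨main.1, main.2.1.trans ?_⟩
  rw [hset]
  exact List.perm_append_singleton x h

-- step/stop equations for the siftup while-loop
theorem pvSiftupLoop_stop (heap : List Int) (e p c : Nat) (h : ¬ c < e) :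
    pvSiftupLoop heap e p c = (heap, p) := by
  rw [pvSiftupLoop]; simp only [dif_neg h]

theorem pvSiftupLoop_step (heap : List Int) (e p c : Nat) (h : c < e) :
    pvSiftupLoop heap e p c =
      pvSiftupLoop
        (heap.set p (heap.getD (if c+1 < e ∧ ¬ heap.getD c 0 < heap.getD (c+1) 0 then c+1 else c) 0))
        e (if c+1 < e ∧ ¬ heap.getD c 0 < heap.getD (c+1) 0 then c+1 else c)
        (2*(if c+1 < e ∧ ¬ heap.getD c 0 < heap.getD (c+1) 0 then c+1 else c)+1) := by
  rw [pvSiftupLoop]; simp only [dif_pos h]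

-- invariant proof for the siftup loop: walking the hole down keeps all other heap relations
theorem pvSiftupLoop_spec : ∀ (fuel : Nat) (heap : List Int) (pos : Nat),
    heap.length - pos ≤ fuel → pos < heap.length →
    (∀ i j : Nat, (j = 2*i+1 ∨ j = 2*i+2) → j < heap.length → i ≠ pos → j ≠ pos →
        heap.getD i 0 ≤ heap.getD j 0) →
    (∀ j : Nat, (j = 2*pos+1 ∨ j = 2*pos+2) → j < heap.length → 0 < pos →
        heap.getD ((pos-1)/2) 0 ≤ heap.getD j 0) →
    (pvSiftupLoop heap heap.length pos (2*pos+1)).2 < heap.length ∧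
    heap.length ≤ 2*(pvSiftupLoop heap heap.length pos (2*pos+1)).2 + 1 ∧
    (∀ n : Int, pvHExc ((pvSiftupLoop heap heap.length pos (2*pos+1)).1.set
        (pvSiftupLoop heap heap.length pos (2*pos+1)).2 n)
        (pvSiftupLoop heap heap.length pos (2*pos+1)).2) ∧
    (∀ n : Int, ((pvSiftupLoop heap heap.length pos (2*pos+1)).1.set
        (pvSiftupLoop heap heap.length pos (2*pos+1)).2 n).Perm (heap.set pos n)) := by
  intro fuel
  induction fuel with
  | zero => intro heap pos hf hp _ _; exact absurd hp (by omega)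
  | succ fuel ih =>
    intro heap pos hf hp Q1 Q2
    by_cases hc : 2*pos+1 < heap.length
    · rw [pvSiftupLoop_step heap heap.length pos (2*pos+1) hc]
      set c := if 2*pos+1+1 < heap.length ∧ ¬ heap.getD (2*pos+1) 0 < heap.getD (2*pos+1+1) 0
        then 2*pos+1+1 else 2*pos+1 with hcdef
      have hcchild : c = 2*pos+1 ∨ c = 2*pos+2 := by rw [hcdef]; split <;> omega
      have hclt : c < heap.length := by
        rw [hcdef]; split
        · next hcond => exact hcond.1
        · exact hc
      have hposc : pos < c := by omega
      have hsmaller : ∀ s, (s = 2*pos+1 ∨ s = 2*pos+2) → s < heap.length →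
          heap.getD c 0 ≤ heap.getD s 0 := by
        intro s hs hslen
        have h22 : 2*pos+1+1 = 2*pos+2 := by omega
        rcases hs with rfl | rfl
        · rw [hcdef]; split
          · next hcond => exact not_lt.mp hcond.2
          · exact le_refl _
        · rw [hcdef]; split
          · next hcond => rw [h22]
          · next hcond =>
            rw [h22] at hcond
            by_cases hb : heap.getD (2*pos+1) 0 < heap.getD (2*pos+2) 0
            · exact le_of_lt hb
            · exact absurd ⟨hslen, hb⟩ hcond
      have hlen2 : (heap.set pos (heap.getD c 0)).length = heap.length := by simp
      have hv : ∀ k, k ≠ pos → (heap.set pos (heap.getD c 0)).getD k 0 = heap.getD k 0 := by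
        intro k hk; rw [pv_getD_set_ne _ _ _ _ (fun e => hk e.symm)]
      have hvpos : (heap.set pos (heap.getD c 0)).getD pos 0 = heap.getD c 0 :=
        pv_getD_set_self _ _ _ hp
      have Q1' : ∀ i j : Nat, (j = 2*i+1 ∨ j = 2*i+2) → j < (heap.set pos (heap.getD c 0)).length →
          i ≠ c → j ≠ c →
          (heap.set pos (heap.getD c 0)).getD i 0 ≤ (heap.set pos (heap.getD c 0)).getD j 0 := by
        intro i j hch hj hic hjc
        have hjlen : j < heap.length := by rwa [hlen2] at hj
        have hij : i < j := by omega
        by_cases hjpos : j = pos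
        · have hipar : i = (pos-1)/2 := by omega
          rw [hipar, hjpos, hv _ (by omega), hvpos]
          exact Q2 c hcchild hclt (by omega)
        · by_cases hipos : i = pos
          · rw [hipos] at hch
            rw [hipos, hvpos, hv j hjpos]
            exact hsmaller j hch hjlen
          · rw [hv i hipos, hv j hjpos]
            exact Q1 i j hch hjlen hipos hjpos
      have Q2' : ∀ j : Nat, (j = 2*c+1 ∨ j = 2*c+2) → j < (heap.set pos (heap.getD c 0)).length →
          0 < c →
          (heap.set pos (heap.getD c 0)).getD ((c-1)/2) 0
            ≤ (heap.set pos (heap.getD c 0)).getD j 0 := by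
        intro j hch hj _
        have hjlen : j < heap.length := by rwa [hlen2] at hj
        have hcp : (c-1)/2 = pos := by omega
        rw [hcp, hvpos, hv j (by omega)]
        exact Q1 c j hch hjlen (by omega) (by omega)
      have IH := ih (heap.set pos (heap.getD c 0)) c (by rw [hlen2]; omega)
        (by rw [hlen2]; exact hclt) Q1' Q2'
      rw [hlen2] at IH
      refine ⟨IH.1, IH.2.1, IH.2.2.1, ?_⟩
      intro n
      refine (IH.2.2.2 n).trans ?_
      have hswap : (((heap.set pos n).set pos ((heap.set pos n).getD c 0)).set c
            ((heap.set pos n).getD pos 0))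
          = (heap.set pos (heap.getD c 0)).set c n := by
        rw [pv_getD_set_ne _ _ _ _ (by omega : pos ≠ c), pv_getD_set_self _ _ _ hp, List.set_set]
      rw [← hswap]
      exact pv_swap_perm (heap.set pos n) pos c hposc (by simpa using hclt)
    · rw [pvSiftupLoop_stop heap heap.length pos (2*pos+1) hc]
      refine ⟨hp, by omega, ?_, fun n => List.Perm.refl _⟩
      intro n i j hch hj hjne
      have hjlen : j < heap.length := by simpa using hj
      by_cases hipos : i = pos
      · subst hipos; exfalso; omega
      · rw [pv_getD_set_ne _ _ _ _ (fun e => hipos e.symm), pv_getD_set_ne _ _ _ _ (fun e => hjne e.symm)]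
        exact Q1 i j hch hjlen hipos hjne

theorem pvSiftup_spec (heap : List Int) (hne : heap ≠ [])
    (Q1 : ∀ i j : Nat, (j = 2*i+1 ∨ j = 2*i+2) → j < heap.length → i ≠ 0 →
        heap.getD i 0 ≤ heap.getD j 0) :
    pvIsHeap (pvSiftup heap 0) ∧ (pvSiftup heap 0).Perm heap := by
  have hlen0 : 0 < heap.length := List.length_pos_of_ne_nil hne
  have S := pvSiftupLoop_spec heap.length heap 0 (by omega) hlen0
    (fun i j hch hj hi _ => Q1 i j hch hj hi)
    (fun j _ _ h0 => absurd h0 (by omega))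
  set r := pvSiftupLoop heap heap.length 0 (2*0+1) with hrdef
  obtain ⟨hr2, hleaf, hHExc, hPerm⟩ := S
  have hrlen : r.1.length = heap.length := by rw [hrdef]; exact pvSiftupLoop_len _ _ _ _
  have hget : (r.1.set r.2 (heap.getD 0 0)).getD r.2 0 = heap.getD 0 0 :=
    pv_getD_set_self _ _ _ (by rw [hrlen]; exact hr2)
  have hself : (r.1.set r.2 (heap.getD 0 0)).set r.2 (heap.getD 0 0)
      = r.1.set r.2 (heap.getD 0 0) := by rw [List.set_set]
  have hD := pvSiftdownLoop_spec r.2 (r.1.set r.2 (heap.getD 0 0)) (heap.getD 0 0) r.2 le_rfl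
    (by rw [List.length_set, hrlen]; exact hr2)
    (by rw [hself]; exact hHExc _)
    (by
      intro j hch hj _
      exfalso
      rw [List.length_set, hrlen] at hj
      omega)
  have hPm := hPerm (heap.getD 0 0)
  rw [pv_set_getD_self _ _ hlen0] at hPm
  have h21 := hD.2.1
  rw [hself] at h21
  have hunf : pvSiftup heap 0
      = (pvSiftdownLoop (r.1.set r.2 (heap.getD 0 0)) (heap.getD 0 0) 0 r.2).1.set
          (pvSiftdownLoop (r.1.set r.2 (heap.getD 0 0)) (heap.getD 0 0) 0 r.2).2 (heap.getD 0 0) := by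
    simp only [pvSiftup, pvSiftdown]
    rw [← hrdef, hget]
  rw [hunf]
  exact ⟨hD.1, h21.trans hPm⟩

theorem pvHeappop_spec (heap : List Int) (hne : heap ≠ []) (hh : pvIsHeap heap) :
    (pvHeappop heap).1 = heap.getD 0 0 ∧ pvIsHeap (pvHeappop heap).2 ∧
    heap.Perm ((pvHeappop heap).1 :: (pvHeappop heap).2) := by
  by_cases hlen1 : heap.length = 1
  · obtain ⟨a, rfl⟩ : ∃ a, heap = [a] := by
      cases heap with
      | nil => simp at hlen1
      | cons a t =>
        cases t with
        | nil => exact ⟨a, rfl⟩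
        | cons b t' => simp at hlen1
    rw [pvHeappop]
    refine ⟨by simp, ?_, by simp⟩
    intro i j _ hj
    simp at hj
  · have hlen2 : 2 ≤ heap.length := by
      have := List.length_pos_of_ne_nil hne; omega
    have hd2ne : heap.dropLast.set 0 (heap.getD (heap.length - 1) 0) ≠ [] := by
      intro e
      apply_fun List.length at e
      simp at e
      omega
    have Q1 : ∀ i j : Nat, (j = 2*i+1 ∨ j = 2*i+2) →
        j < (heap.dropLast.set 0 (heap.getD (heap.length - 1) 0)).length → i ≠ 0 →
        (heap.dropLast.set 0 (heap.getD (heap.length - 1) 0)).getD i 0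
          ≤ (heap.dropLast.set 0 (heap.getD (heap.length - 1) 0)).getD j 0 := by
      intro i j hch hj hi
      have hjlen : j < heap.length - 1 := by simpa using hj
      have hval : ∀ k, k ≠ 0 → k < heap.length - 1 →
          (heap.dropLast.set 0 (heap.getD (heap.length - 1) 0)).getD k 0 = heap.getD k 0 := by
        intro k hk hkl
        rw [pv_getD_set_ne _ _ _ _ (fun e => hk e.symm), pv_dropLast_getD _ _ hkl]
      rw [hval i hi (by omega), hval j (by omega) hjlen]
      exact hh i j hch (by omega)
    have SU := pvSiftup_spec _ hd2ne Q1
    have hunf : pvHeappop heap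
        = (heap.dropLast.getD 0 0,
           pvSiftup (heap.dropLast.set 0 (heap.getD (heap.length - 1) 0)) 0) := by
      rw [pvHeappop]
      have hne' : heap.dropLast ≠ [] := by
        intro e
        apply_fun List.length at e
        simp at e
        omega
      have hie : heap.dropLast.isEmpty = false := by
        cases h' : heap.dropLast.isEmpty
        · rfl
        · exact absurd (List.isEmpty_iff.mp h') hne'
      simp [hie]
    have hret : heap.dropLast.getD 0 0 = heap.getD 0 0 := pv_dropLast_getD heap 0 (by omega)
    refine ⟨by rw [hunf, hret], by rw [hunf]; exact SU.1, ?_⟩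
    rw [hunf, hret]
    refine List.Perm.trans ?_ ((SU.2.symm).cons _)
    obtain ⟨a, s, rfl⟩ : ∃ a s, heap = a :: s := by
      cases heap with
      | nil => exact absurd rfl hne
      | cons a s => exact ⟨a, s, rfl⟩
    have hsne : s ≠ [] := by
      intro e; subst e; simp at hlen2
    have hdl : (a :: s).dropLast = a :: s.dropLast := by
      cases s with
      | nil => exact absurd rfl hsne
      | cons b t => rfl
    have hlast : (a :: s).getD ((a :: s).length - 1) 0 = s.getLast hsne := by
      rw [pv_getD_lt _ _ (by simp)]
      rw [List.getLast_eq_getElem]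
      have hidx : (a :: s).length - 1 = (s.length - 1) + 1 := by
        have := List.length_pos_of_ne_nil hsne
        simp; omega
      simp only [hidx, List.getElem_cons_succ]
    rw [hdl, hlast, List.set_cons_zero]
    simp only [List.getD_cons_zero]
    have hsplit : s.dropLast ++ [s.getLast hsne] = s := List.dropLast_append_getLast hsne
    have hsp : s.Perm (s.getLast hsne :: s.dropLast) := by
      conv_lhs => rw [← hsplit]
      exact List.perm_append_singleton _ _
    exact hsp.cons a

theorem pvIsHeap_root_le (h : List Int) (hh : pvIsHeap h) : ∀ x ∈ h, h.getD 0 0 ≤ x := by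
  have key : ∀ i, i < h.length → h.getD 0 0 ≤ h.getD i 0 := by
    intro i
    induction i using Nat.strong_induction_on with
    | _ i ih =>
      intro hi
      rcases Nat.eq_zero_or_pos i with rfl | hpos
      · exact le_refl _
      · have hch : i = 2*((i-1)/2)+1 ∨ i = 2*((i-1)/2)+2 := by omega
        exact le_trans (ih ((i-1)/2) (by omega) (by omega)) (hh _ i hch hi)
  intro x hx
  obtain ⟨i, hi, rfl⟩ := List.mem_iff_getElem.mp hx
  rw [← pv_getD_lt _ _ hi]
  exact key i hi

theorem pvSorted_head_le (l : List Int) (hs : l.Pairwise (· ≤ ·)) : ∀ x ∈ l, l.getD 0 0 ≤ x := by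
  cases l with
  | nil => intro x hx; simp at hx
  | cons a t =>
    intro x hx
    rcases List.mem_cons.mp hx with rfl | hxt
    · simp
    · simpa using (List.pairwise_cons.mp hs).1 x hxt

theorem pv_head_mem (l : List Int) (hne : l ≠ []) : l.getD 0 0 ∈ l := by
  cases l with
  | nil => exact absurd rfl hne
  | cons a t => simp

-- the heads of a heap and of a sorted list holding the same multiset agree (both are the minimum)
theorem pv_head_eq_of_perm (h l : List Int) (hp : h.Perm l) (hne : h ≠ [])
    (h1 : ∀ x ∈ h, h.getD 0 0 ≤ x) (h2 : ∀ x ∈ l, l.getD 0 0 ≤ x) :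
    h.getD 0 0 = l.getD 0 0 := by
  have hlne : l ≠ [] := by
    intro e
    apply hne
    subst e
    cases h with
    | nil => rfl
    | cons a t => have := hp.length_eq; simp at this
  exact le_antisymm (h1 _ (hp.symm.subset (pv_head_mem l hlne)))
    (h2 _ (hp.subset (pv_head_mem h hne)))

theorem pvInsort_perm (x : Int) (l : List Int) : (pvInsort x l).Perm (x :: l) := by
  induction l with
  | nil => simp [pvInsort]
  | cons y ys ih =>
    simp only [pvInsort]
    split
    · exact List.Perm.refl _
    · exact (ih.cons y).trans (List.Perm.swap x y ys)

theorem pvInsort_mem (x z : Int) (l : List Int) : z ∈ pvInsort x l ↔ z = x ∨ z ∈ l := by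
  rw [(pvInsort_perm x l).mem_iff]; simp

theorem pvInsort_sorted (x : Int) (l : List Int) (hs : l.Pairwise (· ≤ ·)) :
    (pvInsort x l).Pairwise (· ≤ ·) := by
  induction l with
  | nil => simp [pvInsort]
  | cons y ys ih =>
    obtain ⟨hy, hys⟩ := List.pairwise_cons.mp hs
    simp only [pvInsort]
    split
    · next hxy =>
      refine List.pairwise_cons.mpr ⟨?_, hs⟩
      intro z hz
      rcases List.mem_cons.mp hz with rfl | hzys
      · exact le_of_lt hxy
      · exact le_trans (le_of_lt hxy) (hy z hzys)
    · next hxy =>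
      refine List.pairwise_cons.mpr ⟨?_, ih hys⟩
      intro z hz
      rcases (pvInsort_mem x z ys).mp hz with rfl | hzys
      · exact not_lt.mp hxy
      · exact hy z hzys

-- the simulation: A's heap loop and B's sorted-list loop agree whenever the heap and the
-- sorted list hold the same multiset
theorem pvLoop_eq_pvLoopB : ∀ (fuel : Nat) (heap lst : List Int) (cnt K : Int),
    heap.length ≤ fuel → pvIsHeap heap → lst.Pairwise (· ≤ ·) → heap.Perm lst →
    pvLoop fuel heap cnt K = pvLoopB fuel lst cnt K := by
  intro fuel
  induction fuel with
  | zero => intro heap lst cnt K hf hh hs hp; rfl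
  | succ fuel ih =>
    intro heap lst cnt K hf hh hs hp
    have hlen := hp.length_eq
    by_cases hne : heap = []
    · subst hne
      have h1 : lst = [] := by
        cases lst with
        | nil => rfl
        | cons a t => simp at hlen
      subst h1
      simp [pvLoop, pvLoopB]
    · have hlne : lst ≠ [] := by
        intro e
        apply hne
        subst e
        cases heap with
        | nil => rfl
        | cons a t => simp at hlen
      have hhead : heap.getD 0 0 = lst.getD 0 0 :=
        pv_head_eq_of_perm heap lst hp hne (pvIsHeap_root_le heap hh) (pvSorted_head_le lst hs)
      rw [pvLoop, pvLoopB]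
      by_cases hcond : lst.getD 0 0 < K ∧ 1 < lst.length
      · rw [if_pos (by rw [hhead, hlen]; exact hcond), if_pos hcond]
        rcases lst with _ | ⟨a, _ | ⟨b, rest⟩⟩
        · exact absurd rfl hlne
        · exfalso; simp at hcond
        · show pvLoop fuel (pvHeappush (pvHeappop (pvHeappop heap).2).2
              ((pvHeappop heap).1 + (pvHeappop (pvHeappop heap).2).1 * 2)) (cnt + 1) K
            = pvLoopB fuel (pvInsort ((a :: b :: rest).getD 0 0 + (a :: b :: rest).getD 1 0 * 2)
              ((a :: b :: rest).drop 2)) (cnt + 1) K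
          have hgd0 : (a :: b :: rest).getD 0 0 = a := by simp
          have hgd1 : (a :: b :: rest).getD 1 0 = b := by simp
          have hdrop : (a :: b :: rest).drop 2 = rest := by simp
          rw [hgd0, hgd1, hdrop]
          have P1 := pvHeappop_spec heap hne hh
          have hplen1 := pvHeappop_len heap
          have hlenheap : heap.length = rest.length + 2 := by simpa using hlen
          have hne1 : (pvHeappop heap).2 ≠ [] := by
            intro e; rw [e] at hplen1; simp at hplen1; omega
          have P2 := pvHeappop_spec _ hne1 P1.2.1
          have hm1 : (pvHeappop heap).1 = a := by rw [P1.1, hhead]; simp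
          have hperm1 : (pvHeappop heap).2.Perm (b :: rest) := by
            have h3 : ((pvHeappop heap).1 :: (pvHeappop heap).2).Perm (a :: b :: rest) :=
              P1.2.2.symm.trans hp
            rw [hm1] at h3
            exact h3.cons_inv
          have hsort_t : (b :: rest).Pairwise (· ≤ ·) := (List.pairwise_cons.mp hs).2
          have hm2 : (pvHeappop (pvHeappop heap).2).1 = b := by
            rw [P2.1]
            have := pv_head_eq_of_perm _ _ hperm1 hne1
              (pvIsHeap_root_le _ P1.2.1) (pvSorted_head_le _ hsort_t)
            simpa using this
          have hperm2 : (pvHeappop (pvHeappop heap).2).2.Perm rest := by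
            have h3 := P2.2.2.symm.trans hperm1
            rw [hm2] at h3
            exact h3.cons_inv
          have PU := pvHeappush_spec _
            ((pvHeappop heap).1 + (pvHeappop (pvHeappop heap).2).1 * 2) P2.2.1
          apply ih
          · rw [pvHeappush_len, pvHeappop_len, pvHeappop_len]; omega
          · exact PU.1
          · exact pvInsort_sorted _ _ (List.pairwise_cons.mp hsort_t).2
          · refine PU.2.trans ?_
            rw [hm1, hm2]
            exact ((hperm2.cons _)).trans (pvInsort_perm _ rest).symm
      · rw [if_neg (by rw [hhead, hlen]; exact hcond), if_neg hcond, hhead, hlen]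

theorem pv_foldl_push : ∀ (l acc : List Int), pvIsHeap acc →
    pvIsHeap (l.foldl (fun h i => pvHeappush h i) acc) ∧
    (l.foldl (fun h i => pvHeappush h i) acc).Perm (acc ++ l) := by
  intro l
  induction l with
  | nil =>
    intro acc h
    refine ⟨by simpa using h, by simpa using List.Perm.refl acc⟩
  | cons x xs ih =>
    intro acc h
    have hps := pvHeappush_spec acc x h
    have IH := ih (pvHeappush acc x) hps.1
    refine ⟨IH.1, ?_⟩
    simp only [List.foldl_cons]
    refine IH.2.trans ?_
    exact (hps.2.append_right xs).trans List.perm_middle.symm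

-- ===== VERDICT (by name: the statement is the Claim_ definition above) =====
theorem solution_spec : Claim_equal_solution := by
  intro scoville K _ _
  unfold Spec_solution
  show pvLoop (scoville.foldl (fun h i => pvHeappush h i) []).length
        (scoville.foldl (fun h i => pvHeappush h i) []) 0 K
      = pvLoopB (PySem.List.sorted scoville (fun x => x) false).length
        (PySem.List.sorted scoville (fun x => x) false) 0 K
  have hb := pv_foldl_push scoville [] (by intro i j _ hj; simp at hj)
  simp only [List.nil_append] at hb
  have hsp : (PySem.List.sorted scoville (fun x => x) false).Perm scoville := by
    simpa using PySem.List.sorted_perm scoville (fun x => x) false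
  have hperm : (scoville.foldl (fun h i => pvHeappush h i) []).Perm
      (PySem.List.sorted scoville (fun x => x) false) := hb.2.trans hsp.symm
  rw [hperm.length_eq]
  refine pvLoop_eq_pvLoopB _ _ _ 0 K (le_of_eq hperm.length_eq) hb.1 ?_ hperm
  simpa using PySem.List.sorted_pairwise (xs := scoville) (key := fun x => x)
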